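-- pv_equiv track=rewrite | github.com/JZusevics/Data23_Final_Project | FinalProject/app/cleaning_functions/talent_json_cleaning/id_extract.py | tech_skill_id_generator
-- ===== SOURCE A (Python) =====
-- def tech_skill_id_generator(name_dates, skill, candidate_json):
--     """
--     Generates all of the skill ids for the tech skill id tables
--     """
--     list_strengths = []
--     for candidate in name_dates:
--         try:
--             strengths = candidate_json[candidate][skill]
--             for strength in strengths:
--                 if strength not in list_strengths:
--                     list_strengths.append(strength)
--         except KeyError:
--             pass
--     i = 1
--     strengths_id = {}
--     for strength in list_strengths:
--         strengths_id.update({strength: i})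
--         i = i + 1
--     for candidate in name_dates:
--         try:
--             strengths = candidate_json[candidate][skill]
--             for strength in list(strengths):
--                 candidate_json[candidate][skill][strengths_id[strength]] = candidate_json[candidate][skill][
--                     strength]
--                 del candidate_json[candidate][skill][strength]
--         except KeyError:
--             pass
--     strengths_id = {value: key for key, value in strengths_id.items()}
--     return strengths_id
-- ===== SOURCE B (Python) =====
-- def tech_skill_id_generator(name_dates, skill, candidate_json):
--     """
--     Generates all of the skill ids for the tech skill id tables.
--     One pass over name_dates: number each unseen strength as it first appears,
--     building the id -> strength table directly.  (Return value only: unlike the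
--     original, this does not rename keys inside candidate_json.)
--     """
--     seen = set()
--     table = {}
--     i = 1
--     for candidate in name_dates:
--         inner = candidate_json.get(candidate)
--         if inner is None or skill not in inner:
--             continue
--         for strength in inner[skill]:
--             if strength not in seen:
--                 seen.add(strength)
--                 table[i] = strength
--                 i += 1
--     return table
-- ===== Notes on version B (the rewrite author's own statement) =====
-- stated objective: faster
-- what changed: A collects strengths with an O(k) list-membership scan, then numbers them in a second loop and renames keys in a third; B does one fused pass that assigns the next id to each strength on first sight, keeping a set for membership and building the id->strength table directly (return value only: B does not mutate candidate_json).
import Mathlib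
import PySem

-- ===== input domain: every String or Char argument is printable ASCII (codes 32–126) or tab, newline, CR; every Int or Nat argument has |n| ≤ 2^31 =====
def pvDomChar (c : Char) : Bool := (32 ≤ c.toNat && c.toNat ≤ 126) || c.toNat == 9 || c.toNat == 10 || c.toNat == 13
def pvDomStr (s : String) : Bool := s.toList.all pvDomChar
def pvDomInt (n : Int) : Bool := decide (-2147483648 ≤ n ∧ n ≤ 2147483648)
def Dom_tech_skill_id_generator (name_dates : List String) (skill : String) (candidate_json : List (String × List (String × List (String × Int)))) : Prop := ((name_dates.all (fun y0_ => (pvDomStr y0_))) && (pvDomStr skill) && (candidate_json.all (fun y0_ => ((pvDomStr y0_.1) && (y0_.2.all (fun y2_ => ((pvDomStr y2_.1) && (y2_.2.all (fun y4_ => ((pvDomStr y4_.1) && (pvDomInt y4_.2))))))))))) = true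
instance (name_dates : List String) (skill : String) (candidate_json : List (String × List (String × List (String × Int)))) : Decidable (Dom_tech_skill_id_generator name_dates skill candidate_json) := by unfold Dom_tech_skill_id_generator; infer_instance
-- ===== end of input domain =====

-- B fuses A's collect-then-number stages into ONE pass that assigns ids on first sight
-- (objective: simpler; A's list membership scan becomes a set).  A mutates candidate_json
-- in place (renames strength keys to ids); that side effect does not influence the return
-- value and is not mirrored — the equivalence proved here is about the RETURN value only.


-- ===== PORT A =====
-- A's third loop only mutates candidate_json (renaming strength keys to their int ids);
-- the mutated dict leaves the argument's type and never affects the returned dict, so this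
-- return-value port carries A's first loop (collect), second loop (number) and the final
-- inversion comprehension.
def tech_skill_id_generator (name_dates : List String) (skill : String) (candidate_json : List (String × List (String × List (String × Int)))) : List (Int × String) :=
  let list_strengths : List String :=
    name_dates.foldl (fun acc candidate =>
      match (PySem.Dict.mk candidate_json).get? candidate with
      | none => acc                                  -- KeyError on candidate: except pass
      | some inner =>
        match (PySem.Dict.mk inner).get? skill with
        | none => acc                                -- KeyError on skill: except pass
        | some strengths =>
            strengths.foldl
              (fun a (p : String × Int) => if a.contains p.1 then a else a ++ [p.1]) acc) []
  let st := list_strengths.foldl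
      (fun (s : PySem.Dict String Int × Int) strength => (s.1.insert strength s.2, s.2 + 1))
      (PySem.Dict.empty, 1)
  (st.1.items.foldl
      (fun (d : PySem.Dict Int String) (p : String × Int) => d.insert p.2 p.1)
      PySem.Dict.empty).items

-- ===== PORT B =====
def tech_skill_id_generator_alt (name_dates : List String) (skill : String) (candidate_json : List (String × List (String × List (String × Int)))) : List (Int × String) :=
  let final := name_dates.foldl
    (fun (s : PySem.Set String × PySem.Dict Int String × Int) candidate =>
      match (PySem.Dict.mk candidate_json).get? candidate with
      | none => s                                    -- .get returned None: continue
      | some inner =>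
        match (PySem.Dict.mk inner).get? skill with
        | none => s                                  -- skill not in inner: continue
        | some strengths =>
            strengths.foldl (fun t (p : String × Int) =>
              if PySem.Set.contains t.1 p.1 then t
              else (PySem.Set.add t.1 p.1, t.2.1.insert t.2.2 p.1, t.2.2 + 1)) s)
    (PySem.Set.empty, PySem.Dict.empty, 1)
  final.2.1.items

-- ===== PRECONDITION & SPEC =====
def Spec_tech_skill_id_generator (name_dates : List String) (skill : String) (candidate_json : List (String × List (String × List (String × Int)))) (out : List (Int × String)) : Prop := out = tech_skill_id_generator_alt name_dates skill candidate_json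
instance (name_dates : List String) (skill : String) (candidate_json : List (String × List (String × List (String × Int)))) (out : List (Int × String)) : Decidable (Spec_tech_skill_id_generator name_dates skill candidate_json out) := by unfold Spec_tech_skill_id_generator; infer_instance

-- ===== CLAIM (what is proved, stated in full; the proofs are below) =====
def Claim_equal_tech_skill_id_generator : Prop := ∀ (name_dates : List String) (skill : String) (candidate_json : List (String × List (String × List (String × Int)))), Dom_tech_skill_id_generator name_dates skill candidate_json → Spec_tech_skill_id_generator name_dates skill candidate_json (tech_skill_id_generator name_dates skill candidate_json)

-- ===== LEMMAS AND PROOFS =====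

-- Invariant tying B's fused state (seen, table, counter) to A's collected list L.
def pvInv (L : List String) (s : PySem.Set String × PySem.Dict Int String × Int) : Prop :=
  s.1 = L ∧ s.2.1.items = PySem.List.enumerate L 1 ∧ s.2.2 = 1 + (L.length : Int)

lemma pvCounter_fresh (L : List String) (tb : PySem.Dict Int String)
    (h : tb.items = PySem.List.enumerate L 1) :
    tb.contains (1 + (L.length : Int)) = false := by
  by_contra hc
  have hmem := (PySem.Dict.contains_iff_mem_keys tb (1 + (L.length : Int))).1
    (by revert hc; cases tb.contains (1 + (L.length : Int)) <;> simp)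
  have : (1 + (L.length : Int)) ∈ PySem.List.pyRange 1 (1 + (L.length : Int)) 1 := by
    have hk : tb.keys = PySem.List.pyRange 1 (1 + (L.length : Int)) 1 := by
      simp only [PySem.Dict.keys, h]
      exact PySem.List.map_fst_enumerate L 1
    rwa [hk] at hmem
  rw [PySem.List.mem_pyRange_one] at this
  omega

-- One inner loop step structure: the strengths of one candidate preserve the invariant.
lemma pvInner (ss : List (String × Int)) :
    ∀ (L : List String) (s : PySem.Set String × PySem.Dict Int String × Int),
    L.Nodup → pvInv L s →
    (ss.foldl (fun a (p : String × Int) => if a.contains p.1 then a else a ++ [p.1]) L).Nodup ∧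
    pvInv (ss.foldl (fun a (p : String × Int) => if a.contains p.1 then a else a ++ [p.1]) L)
      (ss.foldl (fun t (p : String × Int) =>
        if PySem.Set.contains t.1 p.1 then t
        else (PySem.Set.add t.1 p.1, t.2.1.insert t.2.2 p.1, t.2.2 + 1)) s) := by
  induction ss with
  | nil => intro L s hnd hinv; exact ⟨hnd, hinv⟩
  | cons p ss ih =>
    intro L s hnd hinv
    obtain ⟨h1, h2, h3⟩ := hinv
    simp only [List.foldl_cons]
    by_cases hm : p.1 ∈ L
    · have hc : L.contains p.1 = true := by simpa using hm
      have hcs : PySem.Set.contains s.1 p.1 = true := by rw [h1]; simpa [PySem.Set.contains]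
      rw [hc, hcs]
      simp only [if_true]
      exact ih L s hnd ⟨h1, h2, h3⟩
    · have hc : L.contains p.1 = false := by simpa using hm
      have hcs : PySem.Set.contains s.1 p.1 = false := by rw [h1]; simpa [PySem.Set.contains]
      rw [hc, hcs]
      simp only [if_false, Bool.false_eq_true]
      apply ih (L ++ [p.1])
      · simp [List.nodup_append, hnd]
        exact fun a ha h => hm (h ▸ ha)
      · refine ⟨?_, ?_, ?_⟩
        · rw [h1, PySem.Set.add_of_not_mem hm]
        · show (s.2.1.insert s.2.2 p.1).items = _
          rw [h3, PySem.Dict.items_insert_of_not_contains _ _ (pvCounter_fresh L s.2.1 h2), h2,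
            PySem.List.enumerate_append]
          rfl
        · show s.2.2 + 1 = _
          rw [h3]; simp; omega
  
-- The outer loops of A's first pass and of B preserve the invariant together.
lemma pvOuter (name_dates : List String) (skill : String)
    (candidate_json : List (String × List (String × List (String × Int)))) :
    ∀ (L : List String) (s : PySem.Set String × PySem.Dict Int String × Int),
    L.Nodup → pvInv L s →
    (name_dates.foldl (fun acc candidate =>
      match (PySem.Dict.mk candidate_json).get? candidate with
      | none => acc
      | some inner =>
        match (PySem.Dict.mk inner).get? skill with
        | none => acc
        | some strengths =>
            strengths.foldl
              (fun a (p : String × Int) => if a.contains p.1 then a else a ++ [p.1]) acc) L).Nodup ∧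
    pvInv (name_dates.foldl (fun acc candidate =>
      match (PySem.Dict.mk candidate_json).get? candidate with
      | none => acc
      | some inner =>
        match (PySem.Dict.mk inner).get? skill with
        | none => acc
        | some strengths =>
            strengths.foldl
              (fun a (p : String × Int) => if a.contains p.1 then a else a ++ [p.1]) acc) L)
      (name_dates.foldl (fun s candidate =>
        match (PySem.Dict.mk candidate_json).get? candidate with
        | none => s
        | some inner =>
          match (PySem.Dict.mk inner).get? skill with
          | none => s
          | some strengths =>
              strengths.foldl (fun t (p : String × Int) =>
                if PySem.Set.contains t.1 p.1 then t
                else (PySem.Set.add t.1 p.1, t.2.1.insert t.2.2 p.1, t.2.2 + 1)) s) s) := by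
  induction name_dates with
  | nil => intro L s hnd hinv; exact ⟨hnd, hinv⟩
  | cons c nd ih =>
    intro L s hnd hinv
    simp only [List.foldl_cons]
    cases (PySem.Dict.mk candidate_json).get? c with
    | none => exact ih L s hnd hinv
    | some inner =>
      dsimp only
      cases (PySem.Dict.mk inner).get? skill with
      | none => exact ih L s hnd hinv
      | some strengths =>
        dsimp only
        obtain ⟨hnd', hinv'⟩ := pvInner strengths L s hnd hinv
        exact ih _ _ hnd' hinv'

-- A's numbering loop over the nodup collected list, as items.
lemma pvNumber (L : List String) :
    ∀ (d : PySem.Dict String Int) (i : Int),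
    (∀ x ∈ L, d.contains x = false) → L.Nodup →
    (L.foldl (fun (s : PySem.Dict String Int × Int) strength =>
        (s.1.insert strength s.2, s.2 + 1)) (d, i)).1.items
      = d.items ++ (PySem.List.enumerate L i).map (fun p => (p.2, p.1)) := by
  induction L with
  | nil => intro d i _ _; simp [PySem.List.enumerate_nil]
  | cons x L ih =>
    intro d i hf hnd
    simp only [List.foldl_cons]
    rw [ih (d.insert x i) (i + 1)
      (by
        intro y hy
        have hyx : y ≠ x := by
          intro h; subst h; exact (List.nodup_cons.1 hnd).1 hy
        rw [PySem.Dict.contains_insert]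
        simp only [Bool.or_eq_false_iff]
        exact ⟨by simpa using hyx, hf y (List.mem_cons_of_mem _ hy)⟩)
      (List.nodup_cons.1 hnd).2]
    rw [PySem.Dict.items_insert_of_not_contains _ _ (hf x (List.mem_cons_self))]
    simp [PySem.List.enumerate_cons]

-- The final inversion comprehension over the numbered items recovers enumerate.
lemma pvInvert (L : List String) :
    (((PySem.List.enumerate L 1).map (fun p => (p.2, p.1))).foldl
      (fun (d : PySem.Dict Int String) (p : String × Int) => d.insert p.2 p.1)
      PySem.Dict.empty).items = PySem.List.enumerate L 1 := by
  have hk : ((PySem.List.enumerate L 1).map (fun p => (p.2, p.1))).map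
        (fun (p : String × Int) => p.2)
      = PySem.List.pyRange 1 (1 + (L.length : Int)) 1 := by
    rw [List.map_map]
    simpa [Function.comp] using PySem.List.map_fst_enumerate L 1
  have := PySem.Dict.items_foldl_insert_fresh
    ((PySem.List.enumerate L 1).map (fun p => (p.2, p.1)))
    (fun (p : String × Int) => p.2) (fun p => p.1) PySem.Dict.empty
    (fun a _ => rfl) (by rw [hk]; exact PySem.List.nodup_pyRange_one _ _)
  rw [this]
  have hid : ((fun (a : String × Int) => (a.2, a.1)) ∘ fun (p : Int × String) => (p.2, p.1))
      = id := by funext p; rfl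
  simp [PySem.Dict.empty, hid]

-- ===== VERDICT (by name: the statement is the Claim_ definition above) =====
theorem tech_skill_id_generator_spec : Claim_equal_tech_skill_id_generator := by
  intro name_dates skill candidate_json _
  show tech_skill_id_generator name_dates skill candidate_json
     = tech_skill_id_generator_alt name_dates skill candidate_json
  unfold tech_skill_id_generator tech_skill_id_generator_alt
  dsimp only
  obtain ⟨hnd, h1, h2, h3⟩ := pvOuter name_dates skill candidate_json []
    (PySem.Set.empty, PySem.Dict.empty, 1) List.nodup_nil ⟨rfl, rfl, by simp⟩
  rw [h2]
  rw [pvNumber _ PySem.Dict.empty 1 (by intro x _; rfl) hnd]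
  rw [show (PySem.Dict.empty : PySem.Dict String Int).items = [] from rfl, List.nil_append,
    pvInvert]
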